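-- pv_equiv track=rewrite | github.com/tuhinsaikh/Hospital-App-AI | middleware/app/services/mapping_service.py | _rule_based_mapping
-- ===== SOURCE A (Python) =====
-- def _rule_based_mapping(hms_fields: list[str]) -> dict:
--     """Fallback simple substring matching"""
--     mapping = {}
--     for field in hms_fields:
--         f_lower = field.lower()
--         if "id" in f_lower and "pat" in f_lower: mapping[field] = "patient_id"
--         elif "first" in f_lower or "fname" in f_lower: mapping[field] = "first_name"
--         elif "last" in f_lower or "lname" in f_lower: mapping[field] = "last_name"
--         elif "dob" in f_lower or "birth" in f_lower: mapping[field] = "dob"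
--         elif "sex" in f_lower or "gender" in f_lower: mapping[field] = "gender"
--         else: mapping[field] = None
--     return mapping
-- ===== SOURCE B (Python) =====
-- # Rule-major rewrite: dedup fields once, then sweep the rules back-to-front over a
-- # parallel value list, rebuilding it per rule so earlier rules overwrite later ones.
-- _RULES = [
--     ([["id", "pat"]], "patient_id"),
--     ([["first"], ["fname"]], "first_name"),
--     ([["last"], ["lname"]], "last_name"),
--     ([["dob"], ["birth"]], "dob"),
--     ([["sex"], ["gender"]], "gender"),
-- ]
--
-- def _rule_based_mapping(hms_fields: list[str]) -> dict:
--     fields = list(dict.fromkeys(hms_fields))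
--     values = [None] * len(fields)
--     for alts, canon in reversed(_RULES):
--         values = [canon if any(all(s in f.lower() for s in alt) for alt in alts) else v
--                   for f, v in zip(fields, values)]
--     return dict(zip(fields, values))
-- ===== Notes on version B (the rewrite author's own statement) =====
-- stated objective: alternative
-- what changed: Instead of classifying each field with a first-match branch chain, B dedups the fields once and makes one whole-list pass per rule, sweeping the rules in reverse over a parallel value list so that earlier rules overwrite later matches (rule-major, back-to-front, instead of field-major first-match).
import Mathlib
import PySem

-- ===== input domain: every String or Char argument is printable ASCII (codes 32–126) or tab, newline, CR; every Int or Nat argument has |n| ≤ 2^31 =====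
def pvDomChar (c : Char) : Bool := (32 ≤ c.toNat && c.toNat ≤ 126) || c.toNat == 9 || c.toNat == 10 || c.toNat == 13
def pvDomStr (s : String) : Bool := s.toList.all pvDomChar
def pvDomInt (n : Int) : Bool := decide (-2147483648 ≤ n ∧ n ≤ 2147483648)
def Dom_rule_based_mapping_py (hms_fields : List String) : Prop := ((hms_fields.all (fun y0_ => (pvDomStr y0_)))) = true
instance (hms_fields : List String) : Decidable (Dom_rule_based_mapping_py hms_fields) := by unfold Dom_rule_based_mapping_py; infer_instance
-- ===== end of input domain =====

-- B replaces A's per-field first-match branch chain by rule-major reversed sweeps over a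
-- parallel value list (alternative decomposition, same cost).


-- ===== PORT A =====
def rule_based_mapping_py (hms_fields : List String) : List (String × Option String) :=
  hms_fields.foldl (fun mapping field =>
    let f_lower := PySem.Str.lower field
    if PySem.Str.isIn "id" f_lower && PySem.Str.isIn "pat" f_lower then
      PySem.Dict.insert mapping field (some "patient_id")
    else if PySem.Str.isIn "first" f_lower || PySem.Str.isIn "fname" f_lower then
      PySem.Dict.insert mapping field (some "first_name")
    else if PySem.Str.isIn "last" f_lower || PySem.Str.isIn "lname" f_lower then
      PySem.Dict.insert mapping field (some "last_name")
    else if PySem.Str.isIn "dob" f_lower || PySem.Str.isIn "birth" f_lower then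
      PySem.Dict.insert mapping field (some "dob")
    else if PySem.Str.isIn "sex" f_lower || PySem.Str.isIn "gender" f_lower then
      PySem.Dict.insert mapping field (some "gender")
    else
      PySem.Dict.insert mapping field none)
    (PySem.Dict.empty : PySem.Dict String (Option String)) |>.items

-- ===== PORT B =====
-- each rule: (alternatives, canonical); a rule matches when some alternative has ALL its substrings in f.lower()
def pvRules : List (List (List String) × String) :=
  [([["id", "pat"]], "patient_id"),
   ([["first"], ["fname"]], "first_name"),
   ([["last"], ["lname"]], "last_name"),
   ([["dob"], ["birth"]], "dob"),
   ([["sex"], ["gender"]], "gender")]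

def pvMatches (alts : List (List String)) (f : String) : Bool :=
  alts.any (fun alt => alt.all (fun s => PySem.Str.isIn s (PySem.Str.lower f)))

def rule_based_mapping_py_alt (hms_fields : List String) : List (String × Option String) :=
  let fields := PySem.List.dedup hms_fields
  let values0 : List (Option String) := List.replicate fields.length none
  let values := pvRules.reverse.foldl
    (fun vs r => (fields.zip vs).map (fun p => if pvMatches r.1 p.1 then some r.2 else p.2))
    values0
  ((fields.zip values).foldl (fun d p => PySem.Dict.insert d p.1 p.2)
    (PySem.Dict.empty : PySem.Dict String (Option String))).items

-- ===== PRECONDITION & SPEC =====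
def Spec_rule_based_mapping_py (hms_fields : List String) (out : List (String × Option String)) : Prop := out = rule_based_mapping_py_alt hms_fields
instance (hms_fields : List String) (out : List (String × Option String)) : Decidable (Spec_rule_based_mapping_py hms_fields out) := by unfold Spec_rule_based_mapping_py; infer_instance

-- ===== CLAIM (what is proved, stated in full; the proofs are below) =====
def Claim_equal_rule_based_mapping_py : Prop := ∀ (hms_fields : List String), Dom_rule_based_mapping_py hms_fields → Spec_rule_based_mapping_py hms_fields (rule_based_mapping_py hms_fields)

-- ===== LEMMAS AND PROOFS =====

-- A's per-field classification, as a function of the field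
def pvClassify (field : String) : Option String :=
  let f_lower := PySem.Str.lower field
  if PySem.Str.isIn "id" f_lower && PySem.Str.isIn "pat" f_lower then some "patient_id"
  else if PySem.Str.isIn "first" f_lower || PySem.Str.isIn "fname" f_lower then some "first_name"
  else if PySem.Str.isIn "last" f_lower || PySem.Str.isIn "lname" f_lower then some "last_name"
  else if PySem.Str.isIn "dob" f_lower || PySem.Str.isIn "birth" f_lower then some "dob"
  else if PySem.Str.isIn "sex" f_lower || PySem.Str.isIn "gender" f_lower then some "gender"
  else none

-- getD of a fold of inserts whose value is a function of the key
lemma pv_getD_foldl_insert (g : String → Option String) (l : List String)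
    (d : PySem.Dict String (Option String)) (k : String) :
    (l.foldl (fun d f => d.insert f (g f)) d).getD k none
      = if k ∈ l then g k else d.getD k none := by
  induction l generalizing d with
  | nil => simp
  | cons a t ih =>
      simp only [List.foldl_cons, ih, List.mem_cons]
      rw [PySem.Dict.getD_insert]
      by_cases hkt : k ∈ t
      · simp [hkt]
      · by_cases hka : k = a <;> simp [hkt, hka]

-- items of a fold of inserts whose value is a function of the key: dedup'd keys paired with g
lemma pv_items_foldl_insert (g : String → Option String) (l : List String) :
    (l.foldl (fun d f => d.insert f (g f))
      (PySem.Dict.empty : PySem.Dict String (Option String))).items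
      = (PySem.List.dedup l).map (fun k => (k, g k)) := by
  have hnd : (l.foldl (fun d f => d.insert f (g f))
      (PySem.Dict.empty : PySem.Dict String (Option String))).keys.Nodup :=
    PySem.Dict.nodup_keys_foldl_insert l _ _ (by simp)
  have hkeys : (l.foldl (fun d f => d.insert f (g f))
      (PySem.Dict.empty : PySem.Dict String (Option String))).keys = PySem.List.dedup l := by
    rw [PySem.Dict.keys_foldl_insert]
    simp [PySem.Set.update, PySem.List.dedup_eq_ofList, PySem.Set.ofList_eq_foldl,
      PySem.Dict.keys_empty]
  rw [PySem.Dict.items_eq_map_keys _ hnd none, hkeys]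
  refine List.map_congr_left (fun k hk => ?_)
  have hkl : k ∈ l := (PySem.List.mem_dedup l k).1 hk
  rw [pv_getD_foldl_insert, if_pos hkl]

-- one rule sweep over a value list that is a map of the fields
lemma pv_sweep (fields : List String) (h : String → Option String)
    (alts : List (List String)) (canon : String) :
    (fields.zip (fields.map h)).map
        (fun p => if pvMatches alts p.1 then some canon else p.2)
      = fields.map (fun f => if pvMatches alts f then some canon else h f) := by
  induction fields with
  | nil => rfl
  | cons a t ih => simp [ih]

-- the final dict build from zipped fields/values is a fold of function-of-key inserts
lemma pv_foldl_zip_map (g : String → Option String) (fields : List String)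
    (d : PySem.Dict String (Option String)) :
    (fields.zip (fields.map g)).foldl (fun d p => PySem.Dict.insert d p.1 p.2) d
      = fields.foldl (fun d f => d.insert f (g f)) d := by
  induction fields generalizing d with
  | nil => rfl
  | cons a t ih => simp [ih]

lemma pv_classify_eq (f : String) :
    (if pvMatches [["id", "pat"]] f then some "patient_id"
     else if pvMatches [["first"], ["fname"]] f then some "first_name"
     else if pvMatches [["last"], ["lname"]] f then some "last_name"
     else if pvMatches [["dob"], ["birth"]] f then some "dob"
     else if pvMatches [["sex"], ["gender"]] f then some "gender"
     else none) = pvClassify f := by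
  simp [pvMatches, pvClassify]

-- Set.add over a list that stays duplicate-free just appends
lemma pv_foldl_add_nodup (l : List String) : ∀ acc : List String, (acc ++ l).Nodup →
    l.foldl PySem.Set.add acc = acc ++ l := by
  induction l with
  | nil => intro acc _; simp
  | cons a t ih =>
      intro acc h
      have ha : a ∉ acc := by
        have hd := (List.nodup_append.1 h).2.2
        intro hmem
        exact hd a hmem a (by simp) rfl
      have hadd : PySem.Set.add acc a = acc ++ [a] := by
        simp [PySem.Set.add, PySem.Set.contains, ha]
      have h' : ((acc ++ [a]) ++ t).Nodup := by simpa using h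
      simp only [List.foldl_cons, hadd, ih (acc ++ [a]) h']
      simp

lemma pv_dedup_idem (l : List String) :
    PySem.List.dedup (PySem.List.dedup l) = PySem.List.dedup l := by
  rw [PySem.List.dedup_eq_ofList (PySem.List.dedup l), PySem.Set.ofList_eq_foldl]
  simpa using pv_foldl_add_nodup (PySem.List.dedup l) [] (by simp)

lemma pv_A_items (l : List String) :
    rule_based_mapping_py l = (PySem.List.dedup l).map (fun k => (k, pvClassify k)) := by
  unfold rule_based_mapping_py
  rw [← pv_items_foldl_insert pvClassify l]
  have hfun : (fun (mapping : PySem.Dict String (Option String)) (field : String) =>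
      let f_lower := PySem.Str.lower field
      if PySem.Str.isIn "id" f_lower && PySem.Str.isIn "pat" f_lower then
        PySem.Dict.insert mapping field (some "patient_id")
      else if PySem.Str.isIn "first" f_lower || PySem.Str.isIn "fname" f_lower then
        PySem.Dict.insert mapping field (some "first_name")
      else if PySem.Str.isIn "last" f_lower || PySem.Str.isIn "lname" f_lower then
        PySem.Dict.insert mapping field (some "last_name")
      else if PySem.Str.isIn "dob" f_lower || PySem.Str.isIn "birth" f_lower then
        PySem.Dict.insert mapping field (some "dob")
      else if PySem.Str.isIn "sex" f_lower || PySem.Str.isIn "gender" f_lower then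
        PySem.Dict.insert mapping field (some "gender")
      else
        PySem.Dict.insert mapping field none)
      = fun d f => d.insert f (pvClassify f) := by
    funext d f
    simp only [pvClassify]
    simp only [apply_ite (d.insert f)]
  rw [hfun]

lemma pv_B_items (l : List String) :
    rule_based_mapping_py_alt l = (PySem.List.dedup l).map (fun k => (k, pvClassify k)) := by
  unfold rule_based_mapping_py_alt
  simp only [pvRules, List.reverse_cons, List.reverse_nil, List.nil_append, List.cons_append,
    List.foldl_cons, List.foldl_nil]
  rw [show (List.replicate (PySem.List.dedup l).length (none : Option String))
      = (PySem.List.dedup l).map (fun _ => none) by simp [List.map_const']]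
  rw [pv_sweep, pv_sweep, pv_sweep, pv_sweep, pv_sweep, pv_foldl_zip_map,
    pv_items_foldl_insert, pv_dedup_idem]
  refine List.map_congr_left (fun k _ => ?_)
  rw [← pv_classify_eq k]

-- ===== VERDICT (by name: the statement is the Claim_ definition above) =====
theorem rule_based_mapping_py_spec : Claim_equal_rule_based_mapping_py := by
  intro l _
  unfold Spec_rule_based_mapping_py
  rw [pv_A_items, pv_B_items]
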